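-- pv_equiv track=rewrite | github.com/PurpleMartz/advent-of-code-2020 | 10/Problem 10.py | countDiffArrangements
-- ===== SOURCE A (Python) =====
-- def x(num):
--     if num == 1 or num == 2:
--         return 1
--     if num == 3:
--         return 2
--     return x(num - 3) + x(num - 2) + x(num - 1)
--
-- def countDiffArrangements(arr):
--     result = 1
--     # Take two pointers for maintaining a window of consecutive elements
--     fast, slow = 0, 0
--
--     for i in range(1, len(arr)):
--         # If elements differ by 1, increment only the fast pointer
--         if (arr[i] - arr[i - 1] == 1):
--             fast += 1
--         else:
--             # Calculate length of subarray
--             length = fast - slow + 1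
--             # The possible arrangements - a function of the number of consequtive numbers
--             result *= x(length)
--             fast = i
--             slow = i
--
--     # For last iteration. That is if array is traversed and fast > slow
--     if (fast > slow):
--         length = fast - slow + 1
--         result *= x(length)
--
--     return result
-- ===== SOURCE B (Python) =====
-- def countDiffArrangements(arr):
--     def ways(n):
--         # iterative tribonacci: ways(1)=ways(2)=1, ways(3)=2
--         if n <= 2:
--             return 1
--         a, b, c = 1, 1, 2
--         for _ in range(n - 3):
--             a, b, c = b, c, a + b + c
--         return c
--
--     result = 1
--     run = 1
--     for i in range(1, len(arr)):
--         if arr[i] - arr[i - 1] == 1: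
--             run += 1
--         else:
--             result *= ways(run)
--             run = 1
--     return result * ways(run)
-- ===== Notes on version B (the rewrite author's own statement) =====
-- stated objective: alternative
-- what changed: Replaces the two-pointer window plus naive triple-recursive tribonacci helper with a single pass that tracks the current run length directly and an iterative tribonacci loop.
import Mathlib
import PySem

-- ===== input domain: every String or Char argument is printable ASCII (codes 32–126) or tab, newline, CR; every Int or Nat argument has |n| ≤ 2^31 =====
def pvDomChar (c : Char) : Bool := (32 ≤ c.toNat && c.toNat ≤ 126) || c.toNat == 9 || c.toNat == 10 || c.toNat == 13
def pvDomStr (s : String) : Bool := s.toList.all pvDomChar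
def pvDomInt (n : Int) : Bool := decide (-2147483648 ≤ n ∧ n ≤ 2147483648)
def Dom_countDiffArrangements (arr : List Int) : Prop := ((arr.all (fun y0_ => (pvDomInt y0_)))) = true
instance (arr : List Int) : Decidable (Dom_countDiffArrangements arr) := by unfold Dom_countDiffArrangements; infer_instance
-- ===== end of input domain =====

-- B replaces A's two-pointer window and naive triple-recursive helper x(n) with a single
-- run-length pass and an iterative tribonacci loop (objective: alternative).

-- ===== PORT A =====
-- Python's x(num) diverges (RecursionError) for num ≤ 0; that argument is never produced by
-- countDiffArrangements (run lengths are ≥ 1), so the 'num ≤ 0 → 0' branch is a pure totality guard.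
def pyX (num : Int) : Int :=
  if num = 1 ∨ num = 2 then 1
  else if num = 3 then 2
  else if num ≤ 0 then 0
  else pyX (num - 3) + pyX (num - 2) + pyX (num - 1)
termination_by num.toNat
decreasing_by all_goals omega

def pvStepA (arr : List Int) (st : Int × Int × Int) (i : Int) : Int × Int × Int :=
  if PySem.List.pyGetD arr i 0 - PySem.List.pyGetD arr (i - 1) 0 = 1 then
    (st.1, st.2.1 + 1, st.2.2)
  else
    (st.1 * pyX (st.2.1 - st.2.2 + 1), i, i)

def countDiffArrangements (arr : List Int) : Int :=
  let s := (PySem.List.pyRange 1 (arr.length : Int) 1).foldl (pvStepA arr) (1, 0, 0)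
  if s.2.1 > s.2.2 then s.1 * pyX (s.2.1 - s.2.2 + 1) else s.1

-- ===== PORT B =====
def pyWays (n : Int) : Int :=
  if n ≤ 2 then 1
  else ((PySem.List.pyRange 0 (n - 3) 1).foldl
    (fun (st : Int × Int × Int) _ => (st.2.1, st.2.2, st.1 + st.2.1 + st.2.2)) (1, 1, 2)).2.2

def pvStepB (arr : List Int) (st : Int × Int) (i : Int) : Int × Int :=
  if PySem.List.pyGetD arr i 0 - PySem.List.pyGetD arr (i - 1) 0 = 1 then
    (st.1, st.2 + 1)
  else
    (st.1 * pyWays st.2, 1)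

def countDiffArrangements_alt (arr : List Int) : Int :=
  let s := (PySem.List.pyRange 1 (arr.length : Int) 1).foldl (pvStepB arr) (1, 1)
  s.1 * pyWays s.2

-- ===== PRECONDITION & SPEC =====
def Spec_countDiffArrangements (arr : List Int) (out : Int) : Prop := out = countDiffArrangements_alt arr
instance (arr : List Int) (out : Int) : Decidable (Spec_countDiffArrangements arr out) := by unfold Spec_countDiffArrangements; infer_instance

-- ===== CLAIM (what is proved, stated in full; the proofs are below) =====
def Claim_equal_countDiffArrangements : Prop := ∀ (arr : List Int), Dom_countDiffArrangements arr → Spec_countDiffArrangements arr (countDiffArrangements arr)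

-- ===== LEMMAS AND PROOFS =====

theorem pyX_rec (n : Int) (h : 4 ≤ n) :
    pyX n = pyX (n - 3) + pyX (n - 2) + pyX (n - 1) := by
  rw [pyX]
  rw [if_neg (by omega), if_neg (by omega), if_neg (by omega)]

theorem trib_fold (k : Nat) :
    (PySem.List.pyRange 0 (k : Int) 1).foldl
      (fun (st : Int × Int × Int) _ => (st.2.1, st.2.2, st.1 + st.2.1 + st.2.2)) (1, 1, 2)
      = (pyX (k + 1), pyX (k + 2), pyX (k + 3)) := by
  induction k with
  | zero =>
      simp [PySem.List.pyRange_one_eq_nil]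
      refine ⟨?_, ?_, ?_⟩
      · rw [pyX]; norm_num
      · rw [pyX]; norm_num
      · rw [pyX]; norm_num
  | succ k ih =>
      have : ((k + 1 : Nat) : Int) = (k : Int) + 1 := by push_cast; ring
      rw [this, PySem.List.pyRange_one_succ_right (by positivity), List.foldl_append, ih]
      simp only [List.foldl_cons, List.foldl_nil]
      refine Prod.ext ?_ (Prod.ext ?_ ?_) <;> simp
      · ring_nf
      · ring_nf
      · rw [pyX_rec ((k : Int) + 1 + 3) (by omega)]; ring_nf

theorem ways_eq_x (n : Int) (h : 1 ≤ n) : pyWays n = pyX n := by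
  by_cases h2 : n ≤ 2
  · unfold pyWays
    rw [if_pos h2, pyX, if_pos (by omega)]
  · unfold pyWays
    rw [if_neg (by omega)]
    obtain ⟨k, hk⟩ : ∃ k : Nat, n - 3 = (k : Int) := ⟨(n - 3).toNat, by omega⟩
    rw [hk, trib_fold]
    have : (k : Int) + 3 = n := by omega
    simp [this]

theorem loop_inv (arr : List Int) (n : Nat) (h : 1 ≤ n) :
    ((PySem.List.pyRange 1 (n : Int) 1).foldl (pvStepA arr) (1, 0, 0)).1
      = ((PySem.List.pyRange 1 (n : Int) 1).foldl (pvStepB arr) (1, 1)).1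
    ∧ ((PySem.List.pyRange 1 (n : Int) 1).foldl (pvStepA arr) (1, 0, 0)).2.1 = (n : Int) - 1
    ∧ ((PySem.List.pyRange 1 (n : Int) 1).foldl (pvStepA arr) (1, 0, 0)).2.2
        ≤ ((PySem.List.pyRange 1 (n : Int) 1).foldl (pvStepA arr) (1, 0, 0)).2.1
    ∧ ((PySem.List.pyRange 1 (n : Int) 1).foldl (pvStepA arr) (1, 0, 0)).2.1
        - ((PySem.List.pyRange 1 (n : Int) 1).foldl (pvStepA arr) (1, 0, 0)).2.2 + 1
      = ((PySem.List.pyRange 1 (n : Int) 1).foldl (pvStepB arr) (1, 1)).2 := by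
  induction n, h using Nat.le_induction with
  | base =>
      simp [PySem.List.pyRange_one_eq_nil]
  | succ n hn ih =>
      have hcast : ((n + 1 : Nat) : Int) = (n : Int) + 1 := by push_cast; ring
      rw [hcast, PySem.List.pyRange_one_succ_right (by exact_mod_cast hn), List.foldl_append,
        List.foldl_append]
      simp only [List.foldl_cons, List.foldl_nil]
      obtain ⟨h1, h2, h3, h4⟩ := ih
      set sA := (PySem.List.pyRange 1 (n : Int) 1).foldl (pvStepA arr) (1, 0, 0) with hsA
      set sB := (PySem.List.pyRange 1 (n : Int) 1).foldl (pvStepB arr) (1, 1) with hsB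
      unfold pvStepA pvStepB
      by_cases hc : PySem.List.pyGetD arr (n : Int) 0 - PySem.List.pyGetD arr ((n : Int) - 1) 0 = 1
      · rw [if_pos hc, if_pos hc]
        simp only
        refine ⟨h1, by omega, by omega, by omega⟩
      · rw [if_neg hc, if_neg hc]
        simp only
        refine ⟨?_, by omega, by omega, by omega⟩
        rw [h1, h4, ways_eq_x _ (by omega)]

-- ===== VERDICT (by name: the statement is the Claim_ definition above) =====
theorem countDiffArrangements_spec : Claim_equal_countDiffArrangements := by
  unfold Claim_equal_countDiffArrangements
  intro arr _
  unfold Spec_countDiffArrangements countDiffArrangements countDiffArrangements_alt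
  cases arr with
  | nil => decide
  | cons a as =>
      obtain ⟨h1, h2, h3, h4⟩ := loop_inv (a :: as) (a :: as).length (by simp)
      set sA := (PySem.List.pyRange 1 ((a :: as).length : Int) 1).foldl (pvStepA (a :: as)) (1, 0, 0)
      set sB := (PySem.List.pyRange 1 ((a :: as).length : Int) 1).foldl (pvStepB (a :: as)) (1, 1)
      simp only
      by_cases hgt : sA.2.1 > sA.2.2
      · rw [if_pos hgt, h1, h4, ways_eq_x _ (by omega)]
      · rw [if_neg hgt]
        have hrun : sB.2 = 1 := by omega
        rw [h1, hrun]
        have : pyWays 1 = 1 := by decide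
        rw [this, mul_one]
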